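-- pv_equiv track=rewrite | github.com/Wenbobobo/llms-can-compute-repro | scripts/export_p84_post_p83_keep_set_contraction_and_closeout.py | parse_worktree_rows
-- ===== SOURCE A (Python) =====
-- def parse_worktree_rows(raw: str) -> list[dict[str, str]]:
--     rows: list[dict[str, str]] = []
--     current: dict[str, str] = {}
--     for line in raw.splitlines():
--         if not line.strip():
--             if current:
--                 rows.append(current)
--                 current = {}
--             continue
--         key, _, value = line.partition(" ")
--         current[key] = value.strip()
--     if current:
--         rows.append(current)
--     return rows
-- ===== SOURCE B (Python) =====
-- def parse_worktree_rows(raw: str) -> list[dict[str, str]]: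
--     lines = raw.splitlines()
--     blocks, i, n = [], 0, len(lines)
--     while i < n:
--         if not lines[i].strip():
--             i += 1
--             continue
--         j = i
--         while j < n and lines[j].strip():
--             j += 1
--         blocks.append(lines[i:j])
--         i = j
--     return [{k: v.strip() for k, _, v in (l.partition(" ") for l in block)}
--             for block in blocks]
-- ===== Notes on version B (the rewrite author's own statement) =====
-- stated objective: alternative
-- what changed: Replaces A's single pass with one flush-on-blank dict accumulator by a two-phase decomposition: first split the lines into blocks of consecutive non-blank lines with an index two-pointer scan, then turn each block into a dict with a comprehension over line.partition.
import Mathlib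
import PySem

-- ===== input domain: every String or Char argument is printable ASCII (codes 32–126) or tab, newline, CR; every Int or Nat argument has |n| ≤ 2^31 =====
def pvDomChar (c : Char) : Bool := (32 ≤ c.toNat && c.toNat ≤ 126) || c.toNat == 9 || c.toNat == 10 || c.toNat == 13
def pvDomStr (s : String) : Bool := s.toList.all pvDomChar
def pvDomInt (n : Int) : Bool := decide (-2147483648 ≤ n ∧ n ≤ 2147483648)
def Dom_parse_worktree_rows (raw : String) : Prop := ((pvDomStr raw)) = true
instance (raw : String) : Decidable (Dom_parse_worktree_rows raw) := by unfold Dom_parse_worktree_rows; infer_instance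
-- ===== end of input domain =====

-- B replaces A's single flush-on-blank accumulator pass by a two-phase decomposition
-- (split lines into non-blank blocks, then parse each block); same O(n) cost.

-- shared per-line primitives (both Pythons contain these literally):
-- `not line.strip()`
def pvBlank (l : String) : Bool := PySem.Str.strip l == ""

-- `line.partition(" ")` projected to (key, value): split at the FIRST space;
-- if no space occurs, value is "".  (hand port; exact for the single-char separator " ")
def pvPartChars : List Char → List Char × List Char
  | [] => ([], [])
  | c :: rest =>
      if c = ' ' then ([], rest)
      else
        let p := pvPartChars rest
        (c :: p.1, p.2)

-- `current[key] = value.strip()` for one line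
def pvInsertLine (d : PySem.Dict String String) (line : String) : PySem.Dict String String :=
  let p := pvPartChars line.toList
  d.insert (String.ofList p.1) (String.ofList (PySem.Chars.strip p.2))

-- ===== PORT A =====
def pvStepA (st : List (PySem.Dict String String) × PySem.Dict String String) (line : String) :
    List (PySem.Dict String String) × PySem.Dict String String :=
  if pvBlank line then
    (if st.2.items = [] then st else (st.1 ++ [st.2], PySem.Dict.empty))
  else
    (st.1, pvInsertLine st.2 line)

def parse_worktree_rows (raw : String) : List (List (String × String)) :=
  let st := (PySem.Str.splitlines raw).foldl pvStepA ([], PySem.Dict.empty)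
  (if st.2.items = [] then st.1 else st.1 ++ [st.2]).map PySem.Dict.items

-- ===== PORT B =====
def pvNonblank (l : String) : Bool := !pvBlank l

-- phase 1: the maximal runs of consecutive non-blank lines (B's index two-pointer scan:
-- the inner `while` is the takeWhile, `lines[i:j]` the run, `i = j` the dropWhile)
def pvBlocks : List String → List (List String)
  | [] => []
  | l :: ls =>
      if pvBlank l then pvBlocks ls
      else (l :: ls.takeWhile pvNonblank) :: pvBlocks (ls.dropWhile pvNonblank)
  termination_by ls => ls.length
  decreasing_by
    all_goals (have := List.length_dropWhile_le pvNonblank ls; simp; try omega)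

-- phase 2: the dict comprehension over one block
def pvParseBlock (g : List String) : PySem.Dict String String :=
  g.foldl pvInsertLine PySem.Dict.empty

def parse_worktree_rows_alt (raw : String) : List (List (String × String)) :=
  ((pvBlocks (PySem.Str.splitlines raw)).map pvParseBlock).map PySem.Dict.items

-- ===== PRECONDITION & SPEC =====
def Spec_parse_worktree_rows (raw : String) (out : List (List (String × String))) : Prop := out = parse_worktree_rows_alt raw
instance (raw : String) (out : List (List (String × String))) : Decidable (Spec_parse_worktree_rows raw out) := by unfold Spec_parse_worktree_rows; infer_instance

-- ===== CLAIM (what is proved, stated in full; the proofs are below) =====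
def Claim_equal_parse_worktree_rows : Prop := ∀ (raw : String), Dom_parse_worktree_rows raw → Spec_parse_worktree_rows raw (parse_worktree_rows raw)

-- ===== LEMMAS AND PROOFS =====

-- recursive restatement of A's loop (rows prefix factored out)
def pvGoA : List String → PySem.Dict String String → List (PySem.Dict String String)
  | [], cur => if cur.items = [] then [] else [cur]
  | l :: ls, cur =>
      if pvBlank l then
        (if cur.items = [] then pvGoA ls PySem.Dict.empty else cur :: pvGoA ls PySem.Dict.empty)
      else pvGoA ls (pvInsertLine cur l)

-- B's shape with a live accumulator merged into the first block
def pvF (cur : PySem.Dict String String) (ls : List String) : List (PySem.Dict String String) :=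
  let d := (ls.takeWhile pvNonblank).foldl pvInsertLine cur
  (if d.items = [] then [] else [d]) ++ (pvBlocks (ls.dropWhile pvNonblank)).map pvParseBlock

lemma pvInsertLine_ne_nil (d : PySem.Dict String String) (l : String) :
    (pvInsertLine d l).items ≠ [] := by
  simp only [pvInsertLine, PySem.Dict.insert]
  split
  · next h =>
    simp only [List.map_eq_nil_iff, ne_eq]
    intro he
    rw [PySem.Dict.contains] at h
    simp [he] at h
  · simp

lemma pvFoldlInsert_ne_nil (g : List String) (d : PySem.Dict String String)
    (h : d.items ≠ []) : (g.foldl pvInsertLine d).items ≠ [] := by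
  induction g generalizing d with
  | nil => exact h
  | cons l g ih => exact ih _ (pvInsertLine_ne_nil d l)

lemma pvItems_nil (d : PySem.Dict String String) (h : d.items = []) : d = PySem.Dict.empty := by
  apply PySem.Dict.ext; simp [h, PySem.Dict.empty]

lemma pvBlocks_cons_blank (l : String) (ls : List String) (hb : pvBlank l = true) :
    pvBlocks (l :: ls) = pvBlocks ls := by
  rw [pvBlocks.eq_def]; simp [hb]

lemma pvBlocks_cons_nonblank (l : String) (ls : List String) (hb : pvBlank l = false) :
    pvBlocks (l :: ls)
      = (l :: ls.takeWhile pvNonblank) :: pvBlocks (ls.dropWhile pvNonblank) := by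
  rw [pvBlocks.eq_def]; simp [hb]

-- A's foldl, finished by the final flush, is pvGoA
lemma pvFoldA (ls : List String) (rows : List (PySem.Dict String String))
    (cur : PySem.Dict String String) :
    (if ((ls.foldl pvStepA (rows, cur)).2.items = []) then (ls.foldl pvStepA (rows, cur)).1
     else (ls.foldl pvStepA (rows, cur)).1 ++ [(ls.foldl pvStepA (rows, cur)).2])
      = rows ++ pvGoA ls cur := by
  induction ls generalizing rows cur with
  | nil =>
      simp only [List.foldl_nil, pvGoA]
      split <;> simp_all
  | cons l ls ih =>
      by_cases hb : pvBlank l = true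
      · by_cases hc : cur.items = []
        · have h1 : pvStepA (rows, cur) l = (rows, cur) := by simp [pvStepA, hb, hc]
          rw [List.foldl_cons, h1, ih, pvGoA]
          rw [if_pos hb, if_pos hc, pvItems_nil cur hc]
        · have h1 : pvStepA (rows, cur) l = (rows ++ [cur], PySem.Dict.empty) := by
            simp [pvStepA, hb, hc]
          rw [List.foldl_cons, h1, ih, pvGoA, if_pos hb, if_neg hc, List.append_assoc]
          rfl
      · have h1 : pvStepA (rows, cur) l = (rows, pvInsertLine cur l) := by simp [pvStepA, hb]
        rw [List.foldl_cons, h1, ih, pvGoA, if_neg hb]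

-- with an empty accumulator pvF is exactly B's phase-2 map over phase-1 blocks
lemma pvF_empty (ls : List String) :
    pvF PySem.Dict.empty ls = (pvBlocks ls).map pvParseBlock := by
  cases ls with
  | nil => simp [pvF, pvBlocks, PySem.Dict.empty]
  | cons l ls =>
      by_cases hb : pvBlank l = true
      · have hn : pvNonblank l = false := by simp [pvNonblank, hb]
        rw [pvF, pvBlocks_cons_blank l ls hb]
        simp [hn, PySem.Dict.empty, pvBlocks_cons_blank l ls hb]
      · have hb' : pvBlank l = false := by simpa using hb
        have hn : pvNonblank l = true := by simp [pvNonblank, hb']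
        rw [pvF, pvBlocks_cons_nonblank l ls hb']
        simp only [List.takeWhile_cons, List.dropWhile_cons, hn, if_true, List.foldl_cons,
          List.map_cons]
        have hne : ((ls.takeWhile pvNonblank).foldl pvInsertLine
            (pvInsertLine PySem.Dict.empty l)).items ≠ [] :=
          pvFoldlInsert_ne_nil _ _ (pvInsertLine_ne_nil _ _)
        simp only [if_neg hne]
        rfl

-- A's recursive loop equals pvF for every accumulator
lemma pvGoA_eq_pvF (ls : List String) (cur : PySem.Dict String String) :
    pvGoA ls cur = pvF cur ls := by
  induction ls generalizing cur with
  | nil =>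
      simp only [pvGoA, pvF, List.takeWhile_nil, List.dropWhile_nil, List.foldl_nil, pvBlocks,
        List.map_nil, List.append_nil]
  | cons l ls ih =>
      by_cases hb : pvBlank l = true
      · have hn : pvNonblank l = false := by simp [pvNonblank, hb]
        rw [pvGoA, if_pos hb, pvF]
        simp only [List.takeWhile_cons, List.dropWhile_cons, hn, if_false, Bool.false_eq_true,
          List.foldl_nil]
        rw [pvBlocks_cons_blank l ls hb, ih PySem.Dict.empty, pvF_empty ls]
        by_cases hc : cur.items = [] <;> simp [hc]
      · have hb' : pvBlank l = false := by simpa using hb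
        have hn : pvNonblank l = true := by simp [pvNonblank, hb']
        rw [pvGoA, if_neg hb, pvF]
        simp only [List.takeWhile_cons, List.dropWhile_cons, hn, if_true, List.foldl_cons]
        rw [ih (pvInsertLine cur l)]
        rfl

-- ===== VERDICT (by name: the statement is the Claim_ definition above) =====
theorem parse_worktree_rows_spec : Claim_equal_parse_worktree_rows := by
  intro raw _
  show parse_worktree_rows raw = parse_worktree_rows_alt raw
  show List.map PySem.Dict.items
      (if ((PySem.Str.splitlines raw).foldl pvStepA ([], PySem.Dict.empty)).2.items = []
       then ((PySem.Str.splitlines raw).foldl pvStepA ([], PySem.Dict.empty)).1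
       else ((PySem.Str.splitlines raw).foldl pvStepA ([], PySem.Dict.empty)).1
            ++ [((PySem.Str.splitlines raw).foldl pvStepA ([], PySem.Dict.empty)).2])
    = parse_worktree_rows_alt raw
  rw [pvFoldA, pvGoA_eq_pvF, pvF_empty]
  simp [parse_worktree_rows_alt]
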